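-- pv_equiv track=rewrite | github.com/cspickert/advent-of-code-2020 | day17.py | get_adj_coords
-- ===== SOURCE A (Python) =====
-- ADJ_OFFSETS = {
--     (x, y, z, w)
--     for x in range(-1, 2)
--     for y in range(-1, 2)
--     for z in range(-1, 2)
--     for w in range(-1, 2)
--     if any((x, y, z, w))
-- }
--
-- def get_adj_coords(coords, dims):
--     assert 3 <= dims <= 4
--     x, y, z, w = coords
--     return {
--         (x + dx, y + dy, z + dz, w + dw)
--         for dx, dy, dz, dw in {
--             offset for offset in ADJ_OFFSETS if not any(offset[dims:])
--         }
--     }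
-- ===== SOURCE B (Python) =====
-- def get_adj_coords(coords, dims):
--     assert 3 <= dims <= 4
--     x, y, z, w = coords
--     axes = [(-1, 0, 1)] * dims + [(0,)] * (4 - dims)
--     offsets = [()]
--     for axis in axes:
--         offsets = [off + (d,) for off in offsets for d in axis]
--     return {
--         (x + dx, y + dy, z + dz, w + dw)
--         for dx, dy, dz, dw in offsets
--         if any((dx, dy, dz, dw))
--     }
-- ===== Notes on version B (the rewrite author's own statement) =====
-- stated objective: simpler
-- what changed: Replaces the precomputed global 80-entry 4D offset table and its per-call slice-based filtering with a per-dimension axis list whose cartesian product is built by a fold, skipping the all-zero offset.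
import Mathlib
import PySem

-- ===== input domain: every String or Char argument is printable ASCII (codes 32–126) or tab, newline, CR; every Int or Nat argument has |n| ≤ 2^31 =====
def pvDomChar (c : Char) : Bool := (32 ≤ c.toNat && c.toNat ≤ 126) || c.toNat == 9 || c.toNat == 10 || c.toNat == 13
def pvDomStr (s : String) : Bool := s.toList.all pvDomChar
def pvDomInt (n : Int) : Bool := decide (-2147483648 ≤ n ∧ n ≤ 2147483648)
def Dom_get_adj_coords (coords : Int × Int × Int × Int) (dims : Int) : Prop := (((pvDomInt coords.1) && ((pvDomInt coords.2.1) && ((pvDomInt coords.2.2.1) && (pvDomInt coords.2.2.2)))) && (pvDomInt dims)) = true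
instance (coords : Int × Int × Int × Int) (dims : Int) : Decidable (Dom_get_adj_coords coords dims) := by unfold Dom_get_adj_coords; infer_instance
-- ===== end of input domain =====

-- B replaces A's global 80-entry 4D offset table and its slice-based filter with a per-dimension
-- cartesian product built by a fold (objective: simpler). Both return Python sets; equality is on
-- the element lists of the ports, which coincide.

-- ===== PORT A =====
-- ADJ_OFFSETS: the global set comprehension over range(-1,2)^4 keeping tuples with some nonzero entry
def pvAdjOffsets : PySem.Set (Int × Int × Int × Int) :=
  PySem.Set.ofList (
    (PySem.List.pyRange (-1) 2 1).flatMap fun x =>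
    (PySem.List.pyRange (-1) 2 1).flatMap fun y =>
    (PySem.List.pyRange (-1) 2 1).flatMap fun z =>
    (PySem.List.pyRange (-1) 2 1).filterMap fun w =>
      if x ≠ 0 ∨ y ≠ 0 ∨ z ≠ 0 ∨ w ≠ 0 then some (x, y, z, w) else none)

def get_adj_coords (coords : Int × Int × Int × Int) (dims : Int) : List (Int × Int × Int × Int) :=
  match coords with
  | (x, y, z, w) =>
    -- {offset for offset in ADJ_OFFSETS if not any(offset[dims:])}
    let inner : PySem.Set (Int × Int × Int × Int) :=
      PySem.Set.ofList (pvAdjOffsets.filter fun o =>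
        ! (PySem.List.slice [o.1, o.2.1, o.2.2.1, o.2.2.2] (some dims) none).any (· != 0))
    PySem.Set.ofList (inner.map fun o => (x + o.1, y + o.2.1, z + o.2.2.1, w + o.2.2.2))

-- ===== PORT B =====
def get_adj_coords_alt (coords : Int × Int × Int × Int) (dims : Int) : List (Int × Int × Int × Int) :=
  match coords with
  | (x, y, z, w) =>
    -- axes = [(-1,0,1)]*dims + [(0,)]*(4-dims)
    let axes : List (List Int) :=
      List.replicate dims.toNat [-1, 0, 1] ++ List.replicate (4 - dims).toNat [0]
    -- fold building the cartesian product of the axes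
    let offsets : List (List Int) :=
      axes.foldl (fun acc axis => acc.flatMap fun off => axis.map fun d => off ++ [d]) [[]]
    PySem.Set.ofList (offsets.filterMap fun off =>
      match off with
      | [dx, dy, dz, dw] =>
        if dx ≠ 0 ∨ dy ≠ 0 ∨ dz ≠ 0 ∨ dw ≠ 0 then some (x + dx, y + dy, z + dz, w + dw)
        else none
      | _ => none)

-- ===== PRECONDITION & SPEC =====
-- A's `assert 3 <= dims <= 4` raises AssertionError for any other dims; exactly those are excluded.
def Pre_get_adj_coords (coords : Int × Int × Int × Int) (dims : Int) : Prop := 3 ≤ dims ∧ dims ≤ 4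
instance (coords : Int × Int × Int × Int) (dims : Int) : Decidable (Pre_get_adj_coords coords dims) := by unfold Pre_get_adj_coords; infer_instance
def pvWitness_get_adj_coords : (Int × Int × Int × Int) × Int := ((1, -2, 0, 5), 3)

def Spec_get_adj_coords (coords : Int × Int × Int × Int) (dims : Int) (out : List (Int × Int × Int × Int)) : Prop := out = get_adj_coords_alt coords dims
instance (coords : Int × Int × Int × Int) (dims : Int) (out : List (Int × Int × Int × Int)) : Decidable (Spec_get_adj_coords coords dims out) := by unfold Spec_get_adj_coords; infer_instance

-- ===== CLAIM (what is proved, stated in full; the proofs are below) =====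
def Claim_equal_get_adj_coords : Prop := ∀ (coords : Int × Int × Int × Int) (dims : Int), Dom_get_adj_coords coords dims → Pre_get_adj_coords coords dims → Spec_get_adj_coords coords dims (get_adj_coords coords dims)

-- ===== LEMMAS AND PROOFS =====

-- the symbol-free part of B's filterMap body: keep the offset tuple, drop the all-zero one
def pvKeep (off : List Int) : Option (Int × Int × Int × Int) :=
  match off with
  | [dx, dy, dz, dw] =>
    if dx ≠ 0 ∨ dy ≠ 0 ∨ dz ≠ 0 ∨ dw ≠ 0 then some (dx, dy, dz, dw) else none
  | _ => none

lemma pvB_filterMap_eq (x y z w : Int) (L : List (List Int)) :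
    (L.filterMap fun off =>
      match off with
      | [dx, dy, dz, dw] =>
        if dx ≠ 0 ∨ dy ≠ 0 ∨ dz ≠ 0 ∨ dw ≠ 0 then some (x + dx, y + dy, z + dz, w + dw)
        else none
      | _ => none)
    = (L.filterMap pvKeep).map fun o => (x + o.1, y + o.2.1, z + o.2.2.1, w + o.2.2.2) := by
  rw [List.map_filterMap]
  apply List.filterMap_congr
  intro off _
  match off with
  | [] => rfl
  | [_] => rfl
  | [_, _] => rfl
  | [_, _, _] => rfl
  | [dx, dy, dz, dw] => by_cases h : dx ≠ 0 ∨ dy ≠ 0 ∨ dz ≠ 0 ∨ dw ≠ 0 <;> simp [pvKeep, h]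
  | _ :: _ :: _ :: _ :: _ :: _ => rfl

-- ===== VERDICT (by name: the statement is the Claim_ definition above) =====
set_option maxRecDepth 8192 in
theorem get_adj_coords_spec : Claim_equal_get_adj_coords := by
  intro coords dims _ hpre
  obtain ⟨x, y, z, w⟩ := coords
  obtain ⟨h3, h4⟩ := hpre
  unfold Spec_get_adj_coords get_adj_coords get_adj_coords_alt
  have hd : dims = 3 ∨ dims = 4 := by omega
  rcases hd with rfl | rfl <;>
  · simp only [pvB_filterMap_eq]
    congr 1
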